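-- pv_equiv track=rewrite | github.com/adobe-type-tools/afdko | python/afdko/proofpdf.py | fixGlyphNames
-- ===== SOURCE A (Python) =====
-- def fixGlyphNames(glyphName):
-- 	glyphRange = glyphName.split("-")
-- 	if len(glyphRange) >1:
-- 		g1 = fixGlyphNames(glyphRange[0])
-- 		g2 =  fixGlyphNames(glyphRange[1])
-- 		glyphName =  "%s-%s" % (g1, g2)
--
-- 	elif glyphName[0] == "/":
-- 		glyphName = "cid" + glyphName[1:].zfill(5)
--
-- 	elif glyphName.startswith("cid") and (len(glyphName) < 8):
-- 		return "cid" + glyphName[3:].zfill(5)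
--
-- 	return glyphName
-- ===== SOURCE B (Python) =====
-- def _norm(g):
--     if g[0] == "/":
--         return "cid" + g[1:].zfill(5)
--     if g.startswith("cid") and len(g) < 8:
--         return "cid" + g[3:].zfill(5)
--     return g
--
-- def fixGlyphNames(glyphName):
--     # single left-to-right character scan: collect the first token into `first`,
--     # the second into `buf`, and stop at the second hyphen (no split() call)
--     first = None
--     buf = ""
--     for ch in glyphName:
--         if ch == "-":
--             if first is None:
--                 first = buf
--                 buf = ""
--             else:
--                 break
--         else:
--             buf += ch
--     if first is None:
--         return _norm(glyphName)
--     return _norm(first) + "-" + _norm(buf)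
-- ===== Notes on version B (the rewrite author's own statement) =====
-- stated objective: alternative
-- what changed: Replaces A's split('-') plus depth-limited self-recursion with a single left-to-right character scan (accumulator state: first token, current buffer, early stop at the second hyphen) feeding a flat single-token normalizer.
-- outside the precondition, e.g. on fixGlyphNames(''): A raises IndexError, B raises IndexError; on fixGlyphNames('-'): A raises IndexError, B raises IndexError; on fixGlyphNames('-a'): A raises IndexError, B raises IndexError
import Mathlib
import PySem

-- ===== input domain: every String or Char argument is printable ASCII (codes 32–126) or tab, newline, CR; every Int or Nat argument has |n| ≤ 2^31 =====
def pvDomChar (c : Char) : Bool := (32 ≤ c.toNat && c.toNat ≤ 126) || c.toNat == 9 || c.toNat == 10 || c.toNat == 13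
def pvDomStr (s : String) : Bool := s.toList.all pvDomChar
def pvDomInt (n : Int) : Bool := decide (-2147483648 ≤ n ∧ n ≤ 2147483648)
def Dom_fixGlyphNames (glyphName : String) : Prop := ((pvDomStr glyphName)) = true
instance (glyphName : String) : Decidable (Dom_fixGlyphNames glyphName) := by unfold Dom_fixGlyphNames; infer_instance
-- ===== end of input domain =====

-- B replaces A's split('-') plus self-recursion with a single left-to-right character
-- scan (accumulator: first token / current buffer, early stop at the second hyphen)
-- feeding a flat single-token normalizer (objective: alternative decomposition).

-- ===== PORT A =====
-- A recurses on the pieces of split('-'); the recursion depth is bounded by the string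
-- length, so the port carries a fuel argument (length+1, never exhausted on any input).
def fixGlyphNamesFuel : Nat → String → String
  | 0, glyphName => glyphName
  | fuel+1, glyphName =>
    let glyphRange := (PySem.Chars.splitOn glyphName.toList ['-']).map String.ofList
    if glyphRange.length > 1 then
      let g1 := fixGlyphNamesFuel fuel (glyphRange.getD 0 "")
      let g2 := fixGlyphNamesFuel fuel (glyphRange.getD 1 "")
      g1 ++ "-" ++ g2
    else if PySem.Str.pyGet? glyphName 0 = some '/' then
      "cid" ++ PySem.Str.zfill (PySem.Str.slice glyphName (some 1) none) 5
    else if PySem.Str.startswith glyphName "cid" = true ∧ PySem.Str.len glyphName < 8 then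
      "cid" ++ PySem.Str.zfill (PySem.Str.slice glyphName (some 3) none) 5
    else glyphName

def fixGlyphNames (glyphName : String) : String :=
  fixGlyphNamesFuel (glyphName.toList.length + 1) glyphName

-- ===== PORT B =====
-- _norm from Source B: normalize one hyphen-free token
def pvNorm (g : String) : String :=
  if PySem.Str.pyGet? g 0 = some '/' then
    "cid" ++ PySem.Str.zfill (PySem.Str.slice g (some 1) none) 5
  else if PySem.Str.startswith g "cid" = true ∧ PySem.Str.len g < 8 then
    "cid" ++ PySem.Str.zfill (PySem.Str.slice g (some 3) none) 5
  else g

-- Source B's for-loop: state (buf, first), early break at the second hyphen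
def pvScan : List Char → List Char → Option (List Char) → Option (List Char) × List Char
  | [], buf, first => (first, buf)
  | c :: rest, buf, first =>
    if c = '-' then
      match first with
      | none => pvScan rest [] (some buf)
      | some f => (some f, buf)
    else pvScan rest (buf ++ [c]) first

def fixGlyphNames_alt (glyphName : String) : String :=
  match pvScan glyphName.toList [] none with
  | (none, _) => pvNorm glyphName
  | (some f, b) => pvNorm (String.ofList f) ++ "-" ++ pvNorm (String.ofList b)

-- ===== PRECONDITION & SPEC =====
-- Pre_ excludes exactly the inputs where the Python A raises IndexError (g[0] on an
-- empty token): the empty string, and hyphenated names whose first or second part is empty.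
def Pre_fixGlyphNames (glyphName : String) : Prop :=
  let parts := PySem.Chars.splitOn glyphName.toList ['-']
  if parts.length > 1 then parts.getD 0 [] ≠ [] ∧ parts.getD 1 [] ≠ []
  else glyphName ≠ ""
instance (glyphName : String) : Decidable (Pre_fixGlyphNames glyphName) := by
  unfold Pre_fixGlyphNames; infer_instance

def pvWitness_fixGlyphNames : String := "/123-cid7"

def Spec_fixGlyphNames (glyphName : String) (out : String) : Prop := out = fixGlyphNames_alt glyphName
instance (glyphName : String) (out : String) : Decidable (Spec_fixGlyphNames glyphName out) := by unfold Spec_fixGlyphNames; infer_instance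

-- ===== CLAIM (what is proved, stated in full; the proofs are below) =====
def Claim_equal_fixGlyphNames : Prop := ∀ (glyphName : String), Dom_fixGlyphNames glyphName → Pre_fixGlyphNames glyphName → Spec_fixGlyphNames glyphName (fixGlyphNames glyphName)

-- ===== LEMMAS AND PROOFS =====

-- splitOn's worker on a separator-free remainder just closes the current piece
lemma pvGo_no_sep (l : List Char) : ∀ (fuel : Nat) (cur : List Char) (acc : List (List Char)),
    (∀ c ∈ l, c ≠ '-') → PySem.Chars.splitOn.go ['-'] fuel l cur acc = ((cur.reverse ++ l) :: acc).reverse := by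
  induction l with
  | nil => intro fuel cur acc _; cases fuel <;> simp [PySem.Chars.splitOn.go]
  | cons c rest ih =>
    intro fuel cur acc h
    cases fuel with
    | zero => simp [PySem.Chars.splitOn.go]
    | succ n =>
      have hc : c ≠ '-' := h c (by simp)
      rw [PySem.Chars.splitOn.go]
      simp only [List.isPrefixOf]
      rw [if_neg (by simp [Ne.symm hc])]
      rw [ih n (c :: cur) acc (fun x hx => h x (by simp [hx]))]
      simp

lemma pvSplitOn_no_sep (cs : List Char) (h : ∀ c ∈ cs, c ≠ '-') :
    PySem.Chars.splitOn cs ['-'] = [cs] := by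
  unfold PySem.Chars.splitOn
  rw [pvGo_no_sep cs _ [] [] h]
  simp

-- the worker's accumulator is a plain prefix of the result
lemma pvGo_acc : ∀ (fuel : Nat) (l cur : List Char) (acc : List (List Char)),
    PySem.Chars.splitOn.go ['-'] fuel l cur acc
      = acc.reverse ++ PySem.Chars.splitOn.go ['-'] fuel l cur [] := by
  intro fuel
  induction fuel with
  | zero => intro l cur acc; simp [PySem.Chars.splitOn.go]
  | succ n ih =>
    intro l cur acc
    cases l with
    | nil => simp [PySem.Chars.splitOn.go]
    | cons c rest =>
      rw [PySem.Chars.splitOn.go, PySem.Chars.splitOn.go]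
      by_cases hpre : List.isPrefixOf ['-'] (c :: rest) = true
      · rw [if_pos hpre, if_pos hpre, ih _ _ (cur.reverse :: _), ih _ _ [cur.reverse]]
        simp
      · rw [if_neg hpre, if_neg hpre, ih _ _ acc]

-- the first piece is the longest hyphen-free prefix (relative to cur)
lemma pvGo_head : ∀ (fuel : Nat) (l cur : List Char), l.length < fuel →
    ∃ t, PySem.Chars.splitOn.go ['-'] fuel l cur []
      = (cur.reverse ++ l.takeWhile (fun c => decide (c ≠ '-'))) :: t := by
  intro fuel
  induction fuel with
  | zero => intro l cur h; omega
  | succ n ih =>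
    intro l cur hlen
    cases l with
    | nil => exact ⟨[], by simp [PySem.Chars.splitOn.go]⟩
    | cons c rest =>
      rw [PySem.Chars.splitOn.go]
      by_cases hc : c = '-'
      · subst hc
        rw [if_pos (by simp [List.isPrefixOf])]
        rw [pvGo_acc]
        have hd : List.drop (['-'] : List Char).length ('-' :: rest) = rest := rfl
        rw [hd]
        exact ⟨PySem.Chars.splitOn.go ['-'] n rest [] [], by simp [List.takeWhile]⟩
      · rw [if_neg (by simp [List.isPrefixOf]; exact fun h => hc h.symm)]
        obtain ⟨t, ht⟩ := ih rest (c :: cur) (by simp at hlen ⊢; omega)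
        exact ⟨t, by rw [ht]; simp [List.takeWhile, hc]⟩

-- with a hyphen present, the first two pieces are the two scans B performs
lemma pvGo_two : ∀ (fuel : Nat) (l cur : List Char), l.length < fuel → '-' ∈ l →
    ∃ t, PySem.Chars.splitOn.go ['-'] fuel l cur []
      = (cur.reverse ++ l.takeWhile (fun c => decide (c ≠ '-')))
        :: ((l.dropWhile (fun c => decide (c ≠ '-'))).tail.takeWhile (fun c => decide (c ≠ '-'))) :: t := by
  intro fuel
  induction fuel with
  | zero => intro l cur h; omega
  | succ n ih =>
    intro l cur hlen hmem
    cases l with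
    | nil => simp at hmem
    | cons c rest =>
      rw [PySem.Chars.splitOn.go]
      by_cases hc : c = '-'
      · subst hc
        rw [if_pos (by simp [List.isPrefixOf])]
        rw [pvGo_acc]
        have hd : List.drop (['-'] : List Char).length ('-' :: rest) = rest := rfl
        rw [hd]
        obtain ⟨t, ht⟩ := pvGo_head n rest [] (by simp at hlen ⊢; omega)
        refine ⟨t, ?_⟩
        rw [ht]
        simp [List.takeWhile, List.dropWhile]
      · have hmem' : '-' ∈ rest := by
          rcases List.mem_cons.mp hmem with h | h
          · exact absurd h.symm hc
          · exact h
        rw [if_neg (by simp [List.isPrefixOf]; exact fun h => hc h.symm)]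
        obtain ⟨t, ht⟩ := ih rest (c :: cur) (by simp at hlen ⊢; omega) hmem'
        refine ⟨t, ?_⟩
        rw [ht]
        simp [List.takeWhile, List.dropWhile, hc]

-- B's scan, no hyphen: the whole input flows into the buffer
lemma pvScan_no (l : List Char) : ∀ (buf : List Char), (∀ c ∈ l, c ≠ '-') →
    pvScan l buf none = (none, buf ++ l) := by
  induction l with
  | nil => intro buf _; simp [pvScan]
  | cons c rest ih =>
    intro buf h
    rw [pvScan, if_neg (h c (by simp))]
    rw [ih (buf ++ [c]) (fun x hx => h x (by simp [hx]))]
    simp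

-- B's scan after the first hyphen: collect until the next hyphen or the end
lemma pvScan_some (l : List Char) : ∀ (buf f : List Char),
    pvScan l buf (some f) = (some f, buf ++ l.takeWhile (fun c => decide (c ≠ '-'))) := by
  induction l with
  | nil => intro buf f; simp [pvScan]
  | cons c rest ih =>
    intro buf f
    rw [pvScan]
    by_cases hc : c = '-'
    · rw [if_pos hc]; simp [hc, List.takeWhile]
    · rw [if_neg hc, ih]
      simp [List.takeWhile, hc]

-- B's scan with a hyphen present: first token, then the stretch to the next hyphen
lemma pvScan_yes (l : List Char) : ∀ (buf : List Char), '-' ∈ l →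
    pvScan l buf none
      = (some (buf ++ l.takeWhile (fun c => decide (c ≠ '-'))),
         (l.dropWhile (fun c => decide (c ≠ '-'))).tail.takeWhile (fun c => decide (c ≠ '-'))) := by
  induction l with
  | nil => intro buf h; simp at h
  | cons c rest ih =>
    intro buf hmem
    rw [pvScan]
    by_cases hc : c = '-'
    · rw [if_pos hc, pvScan_some]
      simp [hc, List.takeWhile, List.dropWhile]
    · have hmem' : '-' ∈ rest := by
        rcases List.mem_cons.mp hmem with h | h
        · exact absurd h.symm hc
        · exact h
      rw [if_neg hc, ih (buf ++ [c]) hmem']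
      simp [List.takeWhile, List.dropWhile, hc]

-- on a hyphen-free token, one unfolding of A's body is exactly B's normalizer
lemma pvFuel_step (n : Nat) (p : String) (h : ∀ c ∈ p.toList, c ≠ '-') :
    fixGlyphNamesFuel (n+1) p = pvNorm p := by
  rw [fixGlyphNamesFuel]
  simp only [pvSplitOn_no_sep p.toList h, List.map, String.ofList_toList]
  rw [if_neg (by simp)]
  rfl

theorem pvMain (g : String) : fixGlyphNames g = fixGlyphNames_alt g := by
  unfold fixGlyphNames fixGlyphNames_alt
  by_cases hmem : '-' ∈ g.toList
  · -- hyphen present: both sides produce norm(p0) ++ "-" ++ norm(p1)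
    have hg : g.toList ≠ [] := by intro h; rw [h] at hmem; simp at hmem
    obtain ⟨m, hm⟩ : ∃ m, g.toList.length = m + 1 := by
      cases hL : g.toList with
      | nil => exact absurd hL hg
      | cons a as => exact ⟨as.length, by simp⟩
    obtain ⟨t, ht⟩ := pvGo_two (m + 2) g.toList [] (by omega) hmem
    have hsp : PySem.Chars.splitOn g.toList ['-']
        = (g.toList.takeWhile (fun c => decide (c ≠ '-')))
          :: ((g.toList.dropWhile (fun c => decide (c ≠ '-'))).tail.takeWhile (fun c => decide (c ≠ '-'))) :: t := by
      unfold PySem.Chars.splitOn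
      rw [hm]
      simpa using ht
    rw [pvScan_yes g.toList [] hmem, hm, fixGlyphNamesFuel]
    simp only [hsp, List.map]
    rw [if_pos (by simp)]
    have h0 : ∀ c ∈ (String.ofList (g.toList.takeWhile (fun c => decide (c ≠ '-')))).toList, c ≠ '-' := by
      intro c hc
      simp at hc
      have := List.mem_takeWhile_imp hc
      simpa using this
    have h1 : ∀ c ∈ (String.ofList ((g.toList.dropWhile (fun c => decide (c ≠ '-'))).tail.takeWhile (fun c => decide (c ≠ '-')))).toList, c ≠ '-' := by
      intro c hc
      simp at hc
      have := List.mem_takeWhile_imp hc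
      simpa using this
    simp only [List.getD_cons_zero, List.getD_cons_succ]
    rw [pvFuel_step m _ h0, pvFuel_step m _ h1]
    simp
  · -- no hyphen: both sides are pvNorm g
    have hno : ∀ c ∈ g.toList, c ≠ '-' := fun c hc h => hmem (h ▸ hc)
    rw [pvScan_no g.toList [] hno]
    rw [fixGlyphNamesFuel]
    simp only [pvSplitOn_no_sep g.toList hno, List.map, String.ofList_toList]
    rw [if_neg (by simp)]
    rfl

-- ===== VERDICT (by name: the statement is the Claim_ definition above) =====
theorem fixGlyphNames_spec : Claim_equal_fixGlyphNames := by
  intro g _ _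
  unfold Spec_fixGlyphNames
  exact pvMain g
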